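-- pv_equiv track=rewrite | github.com/gringrape/daily-coding-dojo | 20210822/python2/test_solution.py | solution
-- ===== SOURCE A (Python) =====
-- from itertools import combinations
-- from itertools import permutations
-- from itertools import product
--
-- def solution(word, cards):
--     N = len(cards)
--     M = len(word)
--
--     answer = sorted(list(word))
--
--     candidates = [
--         sorted([cards[r][c] for r, c in zip(row_select, column_select)])
--         for row_select, column_select in product(
--             combinations(range(N), M), permutations(range(N), M)
--         )
--     ]
--
--     count = len([candidate for candidate in candidates if candidate == answer])
--
--     return count
-- ===== SOURCE B (Python) =====
-- from collections import Counter
--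
-- def solution(word, cards):
--     N = len(cards)
--     need = Counter(word)
--
--     def count(r, used, k):
--         if k == 0:
--             return 1
--         if k > N - r:
--             return 0  # not enough rows left to place k more cells
--         total = count(r + 1, used, k)  # skip row r
--         for c, ch in enumerate(cards[r][:N]):
--             if c not in used and need[ch] > 0:
--                 need[ch] -= 1
--                 used.add(c)
--                 total += count(r + 1, used, k - 1)
--                 used.discard(c)
--                 need[ch] += 1
--         return total
--
--     return count(0, set(), len(word))
-- ===== Notes on version B (the rewrite author's own statement) =====
-- stated objective: alternative
-- what changed: replaced A's exhaustive enumeration of all (row-combination, column-permutation) pairs with per-candidate sorting by a recursive backtracking count over rows that places non-attacking cells while decrementing the word's letter counter, pruning columns whose letter is not needed and branches with too few rows left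
import Mathlib
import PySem

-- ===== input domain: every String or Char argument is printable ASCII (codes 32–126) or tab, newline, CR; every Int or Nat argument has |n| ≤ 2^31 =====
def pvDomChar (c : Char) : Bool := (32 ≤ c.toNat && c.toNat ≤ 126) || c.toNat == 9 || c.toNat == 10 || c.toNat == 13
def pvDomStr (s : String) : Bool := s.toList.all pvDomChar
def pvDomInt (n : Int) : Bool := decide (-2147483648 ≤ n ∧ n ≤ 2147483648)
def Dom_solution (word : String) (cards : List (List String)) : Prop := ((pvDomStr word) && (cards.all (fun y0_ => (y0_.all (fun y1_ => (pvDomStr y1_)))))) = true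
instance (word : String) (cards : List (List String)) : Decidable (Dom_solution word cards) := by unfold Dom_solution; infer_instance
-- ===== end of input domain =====

-- B replaces A's enumerate-everything (row-combination × column-permutation, sort each candidate)
-- with a backtracking count over rows that places non-attacking cells while decrementing the
-- word's letter counter, pruning columns whose letter is not still needed (objective: alternative).

-- ===== PORT A =====
-- itertools.product over two lists
def pyProduct {α β : Type} (xs : List α) (ys : List β) : List (α × β) :=
  xs.flatMap (fun x => ys.map (fun y => (x, y)))

def solution (word : String) (cards : List (List String)) : Int :=
  let N := cards.length
  let M := word.toList.length
  let answer := PySem.List.sorted (word.toList.map (fun ch => String.ofList [ch])) (fun x => x)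
  let candidates :=
    (pyProduct (PySem.List.combinations (PySem.List.pyRange 0 (N : Int)) M)
               (PySem.List.permutations (PySem.List.pyRange 0 (N : Int)) M)).map
      (fun p => PySem.List.sorted
        ((p.1.zip p.2).map (fun rc => PySem.List.pyGetD (PySem.List.pyGetD cards rc.1 []) rc.2 ""))
        (fun x => x))
  let count := (candidates.filter (fun c => c == answer)).length
  (count : Int)

-- ===== PORT B =====
-- the recursive helper 'count' of Source B: recursion on the remaining rows; the inner 'for' loop is the foldl
def countB (N : Nat) : List (List String) → PySem.Set Int → PySem.Dict String Int → Int → Int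
  | rows, used, need, k =>
    if k == 0 then 1
    else if (rows.length : Int) < k then 0   -- 'if k > N - r: return 0' (N - r = number of remaining rows)
    else match rows with
      | [] => 0  -- unreachable: rows = [] is caught by the bound above (0 < k)
      | row :: rest =>
          (PySem.List.enumerate (PySem.List.slice row none (some (N : Int)))).foldl
            (fun total p =>
              if ¬ PySem.Set.contains used p.1 ∧ 0 < need.getD p.2 0 then
                total + countB N rest (PySem.Set.add used p.1) (need.modify p.2 0 (fun v => v - 1)) (k - 1)
              else total)
            (countB N rest used need k)

def solution_alt (word : String) (cards : List (List String)) : Int :=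
  let N := cards.length
  let need := PySem.Dict.counter (word.toList.map (fun ch => String.ofList [ch]))
  countB N cards PySem.Set.empty need (word.toList.length : Int)

-- ===== PRECONDITION & SPEC =====
-- Pre_ excludes exactly the inputs on which A raises IndexError: when 1 ≤ len(word) ≤ len(cards),
-- A indexes every cell cards[r][c] for r, c < len(cards), so every row must have length ≥ len(cards).
def Pre_solution (word : String) (cards : List (List String)) : Prop :=
  (1 ≤ word.toList.length ∧ word.toList.length ≤ cards.length) →
    ∀ row ∈ cards, cards.length ≤ row.length
instance (word : String) (cards : List (List String)) : Decidable (Pre_solution word cards) := by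
  unfold Pre_solution; infer_instance

def pvWitness_solution : String × List (List String) := ("ab", [["a", "b"], ["b", "a"]])

def Spec_solution (word : String) (cards : List (List String)) (out : Int) : Prop :=
  out = solution_alt word cards
instance (word : String) (cards : List (List String)) (out : Int) : Decidable (Spec_solution word cards out) := by
  unfold Spec_solution; infer_instance

-- ===== CLAIM (what is proved, stated in full; the proofs are below) =====
def Claim_equal_solution : Prop := ∀ (word : String) (cards : List (List String)),
  Dom_solution word cards → Pre_solution word cards → Spec_solution word cards (solution word cards)
-- ===== LEMMAS AND PROOFS =====

-- the cell values selected by a row list and a column list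
def cellsOf (rs : List (List String)) (cs : List Int) : List String :=
  (rs.zip cs).map (fun p => PySem.List.pyGetD p.1 p.2 "")

-- number of column tuples (k-permutations of cols) whose cells against rs are a permutation of t
def psCount (rs : List (List String)) (cols : List Int) (t : List String) : Nat :=
  (PySem.List.permutations cols t.length).countP (fun cs => decide ((cellsOf rs cs).Perm t))

-- number of (row-combination, column-permutation) pairs whose cells are a permutation of t
def pairCount (rows : List (List String)) (cols : List Int) (t : List String) : Nat :=
  ((PySem.List.combinations rows t.length).map (fun rs => psCount rs cols t)).sum

-- the columns still available given the used set
def availOf (N : Nat) (used : PySem.Set Int) : List Int :=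
  (PySem.List.pyRange 0 (N : Int)).filter (fun c => !(PySem.Set.contains used c))

-- ---- generic list lemmas ----
theorem sum_map_add_nat {α : Type} (l : List α) (f g : α → ℕ) :
    (l.map (fun x => f x + g x)).sum = (l.map f).sum + (l.map g).sum := by
  induction l with
  | nil => simp
  | cons x xs ih => simp [ih]; omega

theorem sum_swap_nat {α β : Type} (L : List α) (R : List β) (a : α → β → ℕ) :
    (L.map (fun x => (R.map (a x)).sum)).sum = (R.map (fun y => (L.map (fun x => a x y)).sum)).sum := by
  induction R with
  | nil => simp
  | cons y R ih =>
    simp only [List.map_cons, List.sum_cons]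
    rw [← ih, ← sum_map_add_nat]

theorem map_range_getD {α β : Type} (l : List α) (d : α) (g : α → β) :
    (List.range l.length).map (fun i => g (l.getD i d)) = l.map g := by
  induction l with
  | nil => simp
  | cons x xs ih =>
    simp only [List.length_cons, List.range_succ_eq_map, List.map_cons, List.map_map,
      Function.comp_def, List.getD_cons_succ, List.getD_cons_zero]
    rw [ih]

theorem eraseIdx_eq_erase_getD {α : Type} [DecidableEq α] (l : List α) (d : α)
    (hnd : l.Nodup) (i : ℕ) (h : i < l.length) :
    l.eraseIdx i = l.erase (l.getD i d) := by
  induction l generalizing i with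
  | nil => simp at h
  | cons x xs ih =>
    cases i with
    | zero => simp
    | succ j =>
      simp only [List.length_cons, Nat.succ_lt_succ_iff] at h
      have hx : x ∉ xs := (List.nodup_cons.mp hnd).1
      have hmem : xs.getD j d ∈ xs := by
        rw [List.getD_eq_getElem xs d h]; exact List.getElem_mem h
      have hne : x ≠ xs.getD j d := fun he => hx (he ▸ hmem)
      simp only [List.eraseIdx_cons_succ, List.getD_cons_succ]
      rw [List.erase_cons_tail (by simpa using hne), ih (List.nodup_cons.mp hnd).2 j h]

theorem sum_filter_eq_sum_ite {α : Type} (l : List α) (P : α → Bool) (f : α → ℕ) :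
    ((l.filter P).map f).sum = (l.map (fun x => if P x then f x else 0)).sum := by
  induction l with
  | nil => simp
  | cons x xs ih => by_cases h : P x <;> simp [h, ih]

theorem cast_sum_map {α : Type} (l : List α) (f : α → ℕ) :
    (((l.map f).sum : ℕ) : ℤ) = (l.map (fun x => (f x : ℤ))).sum := by
  induction l with
  | nil => simp
  | cons x xs ih => simp [ih]

-- ---- psCount / pairCount recursion ----
theorem psCount_nil_t (rs : List (List String)) (cols : List Int) : psCount rs cols [] = 1 := by
  simp [psCount, PySem.List.permutations_zero, cellsOf]

theorem psCount_cons (row : List String) (rs : List (List String)) (cols : List Int)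
    (y : String) (t' : List String) (hnd : cols.Nodup) :
    psCount (row :: rs) cols (y :: t') =
      (cols.map (fun c =>
        if PySem.List.pyGetD row c "" ∈ (y :: t') then
          psCount rs (cols.erase c) ((y :: t').erase (PySem.List.pyGetD row c "")) else 0)).sum := by
  unfold psCount
  rw [show (y :: t').length = t'.length + 1 from rfl, PySem.List.permutations_succ,
    List.countP_flatMap]
  congr 1
  rw [← map_range_getD cols 0 (fun c =>
    if PySem.List.pyGetD row c "" ∈ (y :: t') then
      (PySem.List.permutations (cols.erase c) ((y :: t').erase (PySem.List.pyGetD row c "")).length).countP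
        (fun cs => decide ((cellsOf rs cs).Perm ((y :: t').erase (PySem.List.pyGetD row c "")))) else 0)]
  refine List.map_congr_left (fun i hi => ?_)
  have hi' : i < cols.length := List.mem_range.mp hi
  simp only [Function.comp_apply, List.getElem?_eq_getElem hi',
    List.getD_eq_getElem cols 0 hi']
  rw [List.countP_map]
  have hcell : ∀ cs, cellsOf (row :: rs) (cols[i] :: cs) =
      PySem.List.pyGetD row cols[i] "" :: cellsOf rs cs := fun cs => rfl
  by_cases hc : PySem.List.pyGetD row cols[i] "" ∈ (y :: t')
  · rw [if_pos hc]
    rw [eraseIdx_eq_erase_getD cols 0 hnd i hi', List.getD_eq_getElem cols 0 hi']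
    rw [show ((y :: t').erase (PySem.List.pyGetD row cols[i] "")).length = t'.length by
      rw [List.length_erase_of_mem hc]; rfl]
    refine List.countP_congr (fun cs _ => ?_)
    simp only [Function.comp_apply, hcell, decide_eq_true_eq]
    rw [List.cons_perm_iff_perm_erase]
    exact ⟨fun h => h.2, fun h => ⟨hc, h⟩⟩
  · rw [if_neg hc]
    refine List.countP_eq_zero.mpr (fun cs _ => ?_)
    simp only [Function.comp_apply, hcell, decide_eq_true_eq]
    rw [List.cons_perm_iff_perm_erase]
    exact fun h => hc h.1

theorem pairCount_nil_t (rows : List (List String)) (cols : List Int) : pairCount rows cols [] = 1 := by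
  simp [pairCount, PySem.List.combinations_zero, psCount_nil_t]

theorem pairCount_nil_rows (cols : List Int) (y : String) (t' : List String) :
    pairCount [] cols (y :: t') = 0 := by
  simp [pairCount, PySem.List.combinations_nil_succ]

theorem pairCount_cons (row : List String) (rest : List (List String)) (cols : List Int)
    (y : String) (t' : List String) (hnd : cols.Nodup) :
    pairCount (row :: rest) cols (y :: t') =
      pairCount rest cols (y :: t') +
      (cols.map (fun c =>
        if PySem.List.pyGetD row c "" ∈ (y :: t') then
          pairCount rest (cols.erase c) ((y :: t').erase (PySem.List.pyGetD row c "")) else 0)).sum := by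
  unfold pairCount
  rw [show (y :: t').length = t'.length + 1 from rfl, PySem.List.combinations_cons_succ,
    List.map_append, List.sum_append, List.map_map, add_comm]
  congr 1
  have hps : ∀ rs, psCount (row :: rs) cols (y :: t') =
      (cols.map (fun c =>
        if PySem.List.pyGetD row c "" ∈ (y :: t') then
          psCount rs (cols.erase c) ((y :: t').erase (PySem.List.pyGetD row c "")) else 0)).sum :=
    fun rs => psCount_cons row rs cols y t' hnd
  simp only [Function.comp_def, hps]
  rw [sum_swap_nat]
  refine congrArg List.sum (List.map_congr_left (fun c _ => ?_))
  by_cases hc : PySem.List.pyGetD row c "" ∈ (y :: t')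
  · simp only [if_pos hc]
    rw [show ((y :: t').erase (PySem.List.pyGetD row c "")).length = t'.length by
      rw [List.length_erase_of_mem hc]; rfl]
  · simp only [if_neg hc]
    simp

-- ---- B-side lemmas ----
theorem countB_zero (N : Nat) (rows : List (List String)) (used : PySem.Set Int)
    (need : PySem.Dict String Int) : countB N rows used need 0 = 1 := by
  cases rows <;> rfl

theorem countB_nonzero (N : Nat) (row : List String) (rest : List (List String))
    (used : PySem.Set Int) (need : PySem.Dict String Int) (k : Int) (hk : k ≠ 0)
    (hlen : ¬ (((row :: rest).length : Nat) : Int) < k) :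
    countB N (row :: rest) used need k =
      countB N rest used need k +
      ((PySem.List.enumerate (PySem.List.slice row none (some (N : Int)))).map
        (fun p =>
          if ¬ PySem.Set.contains used p.1 ∧ 0 < need.getD p.2 0 then
            countB N rest (PySem.Set.add used p.1) (need.modify p.2 0 (fun v => v - 1)) (k - 1)
          else 0)).sum := by
  conv_lhs => rw [countB]
  rw [if_neg (by simpa using hk), if_neg hlen]
  rw [PySem.List.foldl_congr_mem _ _
    (fun total p =>
      total + (if ¬ PySem.Set.contains used p.1 ∧ 0 < need.getD p.2 0 then
        countB N rest (PySem.Set.add used p.1) (need.modify p.2 0 (fun v => v - 1)) (k - 1)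
      else 0)) _
    (fun acc x _ => by
      beta_reduce
      by_cases h : ¬ PySem.Set.contains used x.1 = true ∧ 0 < need.getD x.2 0
      · rw [if_pos h, if_pos h]
      · rw [if_neg h, if_neg h, add_zero]),
    PySem.List.foldl_add]

theorem countB_big (N : Nat) (rows : List (List String)) (used : PySem.Set Int)
    (need : PySem.Dict String Int) (k : Int) (h : (rows.length : Int) < k) :
    countB N rows used need k = 0 := by
  have hk : ¬ (k == 0) = true := by
    have h0 : (0 : Int) ≤ (rows.length : Int) := by positivity
    simp only [beq_iff_eq]
    omega
  cases rows with
  | nil =>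
    conv_lhs => rw [countB]
    rw [if_neg hk, if_pos h]
  | cons row rest =>
    conv_lhs => rw [countB]
    rw [if_neg hk, if_pos h]

theorem avail_erase (N : Nat) (used : PySem.Set Int) (c : Int) :
    (availOf N used).erase c = availOf N (PySem.Set.add used c) := by
  unfold availOf
  rw [List.Nodup.erase_eq_filter ((PySem.List.nodup_pyRange_one 0 (N : Int)).filter _) c,
    List.filter_filter]
  refine List.filter_congr (fun x _ => ?_)
  apply Bool.eq_iff_iff.mpr
  simp only [Bool.and_eq_true, bne_iff_ne, Bool.not_eq_true', PySem.Set.contains,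
    List.contains_eq_mem, decide_eq_false_iff_not, PySem.Set.mem_add]
  tauto

theorem countB_eq (N : Nat) (rows : List (List String)) (used : PySem.Set Int)
    (need : PySem.Dict String Int) (t : List String)
    (hrows : ∀ row ∈ rows, N ≤ row.length)
    (hneed : ∀ s, need.getD s 0 = (t.count s : Int)) :
    countB N rows used need (t.length : Int) = (pairCount rows (availOf N used) t : Int) := by
  revert hrows hneed
  induction rows generalizing used need t with
  | nil =>
    intro _ _
    cases t with
    | nil => simp [countB_zero, pairCount_nil_t]
    | cons y t' =>
      rw [countB_big _ _ _ _ _ (by simp), pairCount_nil_rows]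
      simp
  | cons row rest ih =>
    intro hrows hneed
    cases t with
    | nil => simp [countB_zero, pairCount_nil_t]
    | cons y t' =>
      have hk : (((y :: t').length : Nat) : Int) ≠ 0 := by
        rw [List.length_cons]; exact_mod_cast Nat.succ_ne_zero t'.length
      by_cases hbig : (((row :: rest).length : Nat) : Int) < (((y :: t').length : Nat) : Int)
      · rw [countB_big _ _ _ _ _ hbig]
        unfold pairCount
        rw [PySem.List.combinations_eq_nil_of_length_lt (row :: rest) (by exact_mod_cast hbig)]
        simp
      rw [countB_nonzero _ _ _ _ _ _ hk hbig]
      have hN : N ≤ row.length := hrows row (by simp)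
      have hrest : ∀ r ∈ rest, N ≤ r.length := fun r hr => hrows r (by simp [hr])
      have hnd : (availOf N used).Nodup := (PySem.List.nodup_pyRange_one 0 (N : Int)).filter _
      rw [pairCount_cons row rest (availOf N used) y t' hnd, Nat.cast_add,
        ih used need (y :: t') hrest hneed]
      congr 1
      rw [PySem.List.slice_to_natCast row N, PySem.List.enumerate_eq_map_pyRange (row.take N) "",
        show PySem.List.len (row.take N) = (N : Int) by
          show ((row.take N).length : Int) = (N : Int)
          rw [List.length_take_of_le hN],
        List.map_map]
      rw [show availOf N used =
        (PySem.List.pyRange 0 (N : Int)).filter (fun c => !(PySem.Set.contains used c)) from rfl,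
        sum_filter_eq_sum_ite, cast_sum_map]
      refine congrArg List.sum (List.map_congr_left (fun j hj => ?_))
      obtain ⟨hj0, hjN⟩ := PySem.List.mem_pyRange_one.mp hj
      have hjrow : j < (row.length : Int) := lt_of_lt_of_le hjN (by exact_mod_cast hN)
      have hjtN : j < ((row.take N).length : Int) := by rw [List.length_take_of_le hN]; exact hjN
      have hch : PySem.List.pyGetD (row.take N) j "" = PySem.List.pyGetD row j "" := by
        rw [PySem.List.pyGetD_eq_getElem _ _ hj0 hjtN, PySem.List.pyGetD_eq_getElem _ _ hj0 hjrow]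
        exact List.getElem_take
      simp only [Function.comp_def, hch]
      have hcond : (0 < need.getD (PySem.List.pyGetD row j "") 0) ↔
          (PySem.List.pyGetD row j "" ∈ (y :: t')) := by
        rw [hneed]; exact_mod_cast List.count_pos_iff
      by_cases hu : PySem.Set.contains used j = true
      · have hjmem : j ∈ used := by simpa [PySem.Set.contains] using hu
        rw [if_neg (fun h => h.1 hu), if_neg (by simp [hjmem])]
        simp
      · have hfalse : PySem.Set.contains used j = false := by
          revert hu; cases PySem.Set.contains used j <;> simp
        have hnotmem : j ∉ used := by simpa [PySem.Set.contains] using hfalse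
        by_cases hmem : PySem.List.pyGetD row j "" ∈ (y :: t')
        · rw [if_pos ⟨hu, hcond.mpr hmem⟩, if_pos (by simp [hnotmem]), if_pos hmem]
          have hneed' : ∀ s, (need.modify (PySem.List.pyGetD row j "") 0 (fun v => v - 1)).getD s 0 =
              (((y :: t').erase (PySem.List.pyGetD row j "")).count s : Int) := by
            intro s
            rw [PySem.Dict.getD_modify]
            by_cases hs : s = PySem.List.pyGetD row j ""
            · rw [if_pos hs, hs, hneed, List.count_erase_self]
              have h1 : 1 ≤ (y :: t').count (PySem.List.pyGetD row j "") :=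
                List.count_pos_iff.mpr hmem
              omega
            · rw [if_neg hs, hneed, List.count_erase_of_ne hs]
          have hlen' : (((y :: t').length : Nat) : Int) - 1 =
              ((((y :: t').erase (PySem.List.pyGetD row j "")).length : Nat) : Int) := by
            rw [List.length_erase_of_mem hmem]
            simp
          rw [hlen', ih (PySem.Set.add used j)
            (need.modify (PySem.List.pyGetD row j "") 0 (fun v => v - 1))
            (((y :: t').erase (PySem.List.pyGetD row j ""))) hrest hneed',
            show (List.filter (fun c => !PySem.Set.contains used c)
                (PySem.List.pyRange 0 (N : Int))).erase j =
              availOf N (PySem.Set.add used j) from avail_erase N used j]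
        · rw [if_neg (fun h => hmem (hcond.mp h.2)), if_neg hmem, if_pos (by simp [hnotmem])]
          simp

-- ---- A-side assembly ----
theorem countP_pyProduct {α β : Type} (xs : List α) (ys : List β) (P : α × β → Bool) :
    (pyProduct xs ys).countP P = (xs.map (fun x => ys.countP (fun y => P (x, y)))).sum := by
  unfold pyProduct
  rw [List.countP_flatMap]
  refine congrArg List.sum (List.map_congr_left (fun x _ => ?_))
  simp [List.countP_map, Function.comp_def]

theorem solution_eq_pairCount (word : String) (cards : List (List String)) :
    solution word cards =
      (pairCount cards (PySem.List.pyRange 0 (cards.length : Int))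
        (word.toList.map (fun ch => String.ofList [ch])) : Int) := by
  simp only [solution]
  rw [← List.countP_eq_length_filter, List.countP_map]
  norm_cast
  rw [countP_pyProduct]
  unfold pairCount
  have hlen : (word.toList.map (fun ch => String.ofList [ch])).length = word.toList.length :=
    List.length_map _
  have hcomb := PySem.List.combinations_map (fun r => PySem.List.pyGetD cards r [])
    (PySem.List.pyRange 0 (PySem.List.len cards)) word.toList.length
  rw [PySem.List.map_pyGetD_pyRange_zero] at hcomb
  rw [hlen, hcomb]
  rw [List.map_map]
  refine congrArg List.sum (List.map_congr_left (fun rsIdx _ => ?_))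
  unfold psCount
  rw [hlen]
  refine List.countP_congr (fun cs _ => ?_)
  simp only [Function.comp_apply, beq_iff_eq, decide_eq_true_eq,
    PySem.List.sorted_id_eq_sorted_id_iff_perm, cellsOf, List.zip_map_left, List.map_map]
  rfl

theorem solution_alt_eq (word : String) (cards : List (List String))
    (hrows : (1 ≤ word.toList.length ∧ word.toList.length ≤ cards.length) →
      ∀ row ∈ cards, cards.length ≤ row.length) :
    solution_alt word cards =
      (pairCount cards (PySem.List.pyRange 0 (cards.length : Int))
        (word.toList.map (fun ch => String.ofList [ch])) : Int) := by
  simp only [solution_alt]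
  rcases Nat.eq_zero_or_pos word.toList.length with h0 | h1
  · have hw : word.toList = [] := List.length_eq_zero_iff.mp h0
    simp [hw, countB_zero, pairCount_nil_t]
  · rcases Nat.lt_or_ge cards.length word.toList.length with hNM | hMN
    swap
    · have hr : ∀ row ∈ cards, cards.length ≤ row.length := hrows ⟨h1, hMN⟩
      have hav : availOf cards.length PySem.Set.empty =
          PySem.List.pyRange 0 ((cards.length : Nat) : Int) := by
        unfold availOf
        refine List.filter_eq_self.mpr (fun x _ => ?_)
        simp [PySem.Set.contains, PySem.Set.empty]
      have hlen : (word.toList.map (fun ch => String.ofList [ch])).length = word.toList.length :=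
        List.length_map _
      have hneed : ∀ s,
          (PySem.Dict.counter (word.toList.map (fun ch => String.ofList [ch]))).getD s 0 =
          ((word.toList.map (fun ch => String.ofList [ch])).count s : Int) :=
        fun s => PySem.Dict.getD_counter _ s
      have := countB_eq cards.length cards PySem.Set.empty
        (PySem.Dict.counter (word.toList.map (fun ch => String.ofList [ch])))
        (word.toList.map (fun ch => String.ofList [ch])) hr hneed
      rw [hav, hlen] at this
      exact this
    · rw [countB_big _ _ _ _ _ (by exact_mod_cast hNM)]
      unfold pairCount
      rw [PySem.List.combinations_eq_nil_of_length_lt cards (by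
        rw [List.length_map]; exact hNM)]
      simp

-- ===== VERDICT (by name: the statement is the Claim_ definition above) =====
theorem solution_spec : Claim_equal_solution := by
  intro word cards _ hpre
  unfold Spec_solution
  rw [solution_eq_pairCount, solution_alt_eq word cards hpre]
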